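-- pv_equiv track=rewrite | github.com/matty-bo/advent-of-code | 2020/Day_11/day11_part2.py | get_changes
-- ===== SOURCE A (Python) =====
-- def empty_prim(i, j, data):
--     for way in adj:
--         n = nn(i, j, way, data)
--         if n == '#':
--             return 'L'
--     return '#'
--
-- def occup_prim(i, j, data):
--     count = 0
--     for way in adj:
--         n = nn(i, j, way, data)
--         count += n == '#'
--         if count >= 5:
--             return 'L'
--     return '#'
--
-- def outside(i, j, data):
--     li, ui = 0, len(data)
--     lj, uj = 0, len(data[0])
--     return not (li <= i < ui and lj <= j < uj)
--
-- def nn(i, j, way, data):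
--     while True:
--         i, j = adj[way](i, j)
--         if outside(i, j, data):
--             return False
--         if data[i][j] != '.':
--             break
--     return data[i][j]
--
-- def get_changes(data):
--     changes = {}
--     for i in range(len(data)):
--         for j in range(len(data[0])):
--             new_val = data[i][j]
--             if data[i][j] == 'L':
--                 new_val = empty_prim(i, j, data)
--             elif data[i][j] == '#':
--                 new_val = occup_prim(i, j, data)
--             if new_val != data[i][j]:
--                 changes[(i, j)] = new_val
--     return changes
--
-- adj = {0: lambda i, j: (i - 1, j - 1),  # 0 3 6
--        1: lambda i, j: (i - 1, j),  # 1 4 7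
--        2: lambda i, j: (i - 1, j + 1),  # 2 5 8
--        3: lambda i, j: (i, j - 1),
--        5: lambda i, j: (i, j + 1),
--        6: lambda i, j: (i + 1, j - 1),
--        7: lambda i, j: (i + 1, j),
--        8: lambda i, j: (i + 1, j + 1)}
-- ===== SOURCE B (Python) =====
-- def get_changes(data):
--     changes = {}
--     if not data:
--         return changes
--     R, C = len(data), len(data[0])
--     dirs = ((-1, -1), (-1, 0), (-1, 1), (0, -1), (0, 1), (1, -1), (1, 0), (1, 1))
--     # vis[(di, dj, i, j)] = nearest non-floor character seen from (i, j) in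
--     # looking-direction (di, dj), or None.  Each sight-line is swept ONCE,
--     # walking from its far end (the cell whose (di, dj)-neighbour is outside)
--     # back against the looking direction, carrying the nearest seat so far.
--     vis = {}
--     for di, dj in dirs:
--         for si in range(R):
--             for sj in range(C):
--                 if 0 <= si + di < R and 0 <= sj + dj < C:
--                     continue  # (si, sj) is not the far end of a sight-line
--                 cur = None
--                 i, j = si, sj
--                 while 0 <= i < R and 0 <= j < C:
--                     vis[(di, dj, i, j)] = cur
--                     c = data[i][j]
--                     if c != '.':
--                         cur = c
--                     i -= di
--                     j -= dj
--     for i in range(R):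
--         for j in range(C):
--             c = data[i][j]
--             k = sum(vis.get((di, dj, i, j)) == '#' for di, dj in dirs)
--             if c == 'L' and k == 0:
--                 changes[(i, j)] = '#'
--             elif c == '#' and k >= 5:
--                 changes[(i, j)] = 'L'
--     return changes
-- ===== Notes on version B (the rewrite author's own statement) =====
-- stated objective: alternative
-- what changed: A re-walks a ray from every cell in each of the 8 directions until it hits a seat or the border; B instead sweeps every sight-line exactly once per direction, from its far end, carrying the nearest non-floor character seen so far into a table, and then reads each cell's 8 first-visible seats off that table.
import Mathlib
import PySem

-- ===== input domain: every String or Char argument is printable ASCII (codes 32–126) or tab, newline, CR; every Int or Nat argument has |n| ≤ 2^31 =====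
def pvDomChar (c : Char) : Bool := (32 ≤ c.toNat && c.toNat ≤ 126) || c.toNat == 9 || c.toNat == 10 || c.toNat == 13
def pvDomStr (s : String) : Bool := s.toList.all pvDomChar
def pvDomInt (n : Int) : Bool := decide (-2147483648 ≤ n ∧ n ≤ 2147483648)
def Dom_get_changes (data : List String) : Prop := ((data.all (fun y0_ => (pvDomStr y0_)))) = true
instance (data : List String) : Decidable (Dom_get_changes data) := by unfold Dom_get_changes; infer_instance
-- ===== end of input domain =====

-- B replaces A's per-cell ray walks by a different, single-pass-per-direction algorithm:
-- each sight-line is swept once from its far end, carrying the nearest non-floor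
-- character seen so far into a table that the final loop reads off.

-- ===== PORT A =====

-- data[i][j] as a Char; the defaults are never reached on inputs satisfying Pre_
-- (A checks `outside` before indexing, and Pre_ makes every row at least len(data[0]) long).
def pvCell (data : List String) (i j : Int) : Char :=
  PySem.List.pyGetD (PySem.List.pyGetD data i "").toList j '.'

-- Python's `outside(i, j, data)`
def pvOutside (i j : Int) (data : List String) : Bool :=
  !(decide (0 ≤ i) && decide (i < (data.length : Int)) &&
    decide (0 ≤ j) && decide (j < (((data.headD "").length : Int))))

-- the direction table `adj` (keys 0,1,2,3,5,6,7,8 in insertion order)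
def adjD (way : Nat) : Int × Int :=
  match way with
  | 0 => (-1, -1) | 1 => (-1, 0) | 2 => (-1, 1) | 3 => (0, -1)
  | 5 => (0, 1)   | 6 => (1, -1) | 7 => (1, 0)  | _ => (1, 1)   -- `_` is key 8

def pvWays : List Nat := [0, 1, 2, 3, 5, 6, 7, 8]

-- the `while True` loop of `nn`, with fuel (R + C + 2 steps always suffice); none = Python's False
def nnF (data : List String) (di dj : Int) : Nat → Int → Int → Option Char
  | 0, _, _ => none
  | fuel + 1, i, j =>
    let i' := i + di
    let j' := j + dj
    if pvOutside i' j' data then none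
    else if pvCell data i' j' ≠ '.' then some (pvCell data i' j')
    else nnF data di dj fuel i' j'

def pvFuel (data : List String) : Nat := data.length + (data.headD "").length + 2

def nn (i j : Int) (way : Nat) (data : List String) : Option Char :=
  nnF data (adjD way).1 (adjD way).2 (pvFuel data) i j

def emptyLoop (i j : Int) (data : List String) : List Nat → String
  | [] => "#"
  | w :: ws => if nn i j w data = some '#' then "L" else emptyLoop i j data ws

def empty_prim (i j : Int) (data : List String) : String := emptyLoop i j data pvWays

def occupLoop (i j : Int) (data : List String) : List Nat → Int → String
  | [], _ => "#"
  | w :: ws, count =>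
    let count := count + (if nn i j w data = some '#' then 1 else 0)
    if 5 ≤ count then "L" else occupLoop i j data ws count

def occup_prim (i j : Int) (data : List String) : String := occupLoop i j data pvWays 0

-- the Python result dict is keyed by (i, j) and each key is written at most once,
-- so it is ported as the append-only list of (i, j, new_val) triples
def get_changes (data : List String) : List (Int × Int × String) :=
  (PySem.List.pyRange 0 (data.length : Int) 1).foldl (fun acc i =>
    (PySem.List.pyRange 0 ((data.headD "").length : Int) 1).foldl (fun acc j =>
      let c := pvCell data i j
      let old := String.ofList [c]
      let new_val :=
        if c = 'L' then empty_prim i j data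
        else if c = '#' then occup_prim i j data
        else old
      if new_val ≠ old then acc ++ [(i, j, new_val)] else acc) acc) []

-- ===== PORT B =====

def altDirs : List (Int × Int) :=
  [(-1, -1), (-1, 0), (-1, 1), (0, -1), (0, 1), (1, -1), (1, 0), (1, 1)]

def pvInb (R C i j : Int) : Bool :=
  decide (0 ≤ i) && decide (i < R) && decide (0 ≤ j) && decide (j < C)

-- the inner `while` of Source B: walk one sight-line against direction (di, dj),
-- carrying `cur`, the nearest non-floor character behind us (fuel: R + C + 2 suffices)
def walkF (data : List String) (R C di dj : Int) :
    Nat → Int → Int → Option Char →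
    PySem.Dict (Int × Int × Int × Int) (Option Char) →
    PySem.Dict (Int × Int × Int × Int) (Option Char)
  | 0, _, _, _, vis => vis
  | fuel + 1, i, j, cur, vis =>
    if pvInb R C i j then
      let vis' := vis.insert (di, dj, i, j) cur
      let c := pvCell data i j
      let cur' := if c ≠ '.' then some c else cur
      walkF data R C di dj fuel (i - di) (j - dj) cur' vis'
    else vis

-- the sweep phase of Source B: for every direction, walk every sight-line once from its far end
def visFold (data : List String) : PySem.Dict (Int × Int × Int × Int) (Option Char) :=
  altDirs.foldl (fun vis d =>
    (PySem.List.pyRange 0 (data.length : Int) 1).foldl (fun vis si =>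
      (PySem.List.pyRange 0 ((data.headD "").length : Int) 1).foldl (fun vis sj =>
        if pvInb (data.length : Int) ((data.headD "").length : Int) (si + d.1) (sj + d.2) then vis
        else walkF data (data.length : Int) ((data.headD "").length : Int) d.1 d.2 (pvFuel data) si sj none vis) vis) vis)
    PySem.Dict.empty

def get_changes_alt (data : List String) : List (Int × Int × String) :=
  if data.isEmpty then [] else
  let vis := visFold data
  (PySem.List.pyRange 0 (data.length : Int) 1).foldl (fun acc i =>
    (PySem.List.pyRange 0 ((data.headD "").length : Int) 1).foldl (fun acc j =>
      let c := pvCell data i j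
      let k : Int := altDirs.foldl
        (fun s d => s + (if vis.getD (d.1, d.2, i, j) none = some '#' then 1 else 0)) 0
      if c = 'L' ∧ k = 0 then acc ++ [(i, j, "#")]
      else if c = '#' ∧ 5 ≤ k then acc ++ [(i, j, "L")]
      else acc) acc) []

-- ===== PRECONDITION & SPEC =====

-- Pre_ excludes exactly the inputs on which Python A raises IndexError: a row shorter
-- than the first row is indexed at data[i][j] for j < len(data[0]).
def Pre_get_changes (data : List String) : Prop :=
  ∀ s ∈ data, (data.headD "").length ≤ s.length
instance (data : List String) : Decidable (Pre_get_changes data) := by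
  unfold Pre_get_changes; infer_instance

def pvWitness_get_changes : List String := ["L.L", "#.L", ".#L"]

def Spec_get_changes (data : List String) (out : List (Int × Int × String)) : Prop := out = get_changes_alt data
instance (data : List String) (out : List (Int × Int × String)) : Decidable (Spec_get_changes data out) := by unfold Spec_get_changes; infer_instance

-- ===== CLAIM (what is proved, stated in full; the proofs are below) =====
def Claim_equal_get_changes : Prop := ∀ (data : List String), Dom_get_changes data → Pre_get_changes data → Spec_get_changes data (get_changes data)

-- ===== LEMMAS AND PROOFS =====

-- the canonical per-cell description both programs are reduced to
def pvBnd (data : List String) (di dj i j : Int) : Nat :=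
  if di < 0 then (i + 1).toNat
  else if 0 < di then ((data.length : Int) - i).toNat
  else if dj < 0 then (j + 1).toNat
  else (((data.headD "").length : Int) - j).toNat

def Seek (data : List String) (di dj i j : Int) : Option Char :=
  nnF data di dj (pvBnd data di dj i j) i j

def cntN (data : List String) (i j : Int) : Nat :=
  altDirs.countP (fun d => Seek data d.1 d.2 i j == some '#')

def changeAt (data : List String) (i j : Int) : Option String :=
  let c := pvCell data i j
  if c = 'L' ∧ cntN data i j = 0 then some "#"
  else if c = '#' ∧ 5 ≤ cntN data i j then some "L"
  else none

def canonical (data : List String) : List (Int × Int × String) :=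
  (PySem.List.pyRange 0 (data.length : Int) 1).foldl (fun acc i =>
    (PySem.List.pyRange 0 ((data.headD "").length : Int) 1).foldl (fun acc j =>
      match changeAt data i j with
      | some v => acc ++ [(i, j, v)]
      | none => acc) acc) []


-- --- direction bookkeeping ---

theorem pvOutside_eq (data : List String) (i j : Int) :
    pvOutside i j data
      = !pvInb (data.length : Int) ((data.headD "").length : Int) i j := by
  simp [pvOutside, pvInb]

theorem pvBnd_zero_outside {data : List String} {di dj : Int}
    (hd : (di, dj) ∈ altDirs) {i j : Int} (h : pvBnd data di dj i j = 0) :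
    pvOutside (i + di) (j + dj) data = true := by
  fin_cases hd <;>
    (simp only [pvBnd] at h;
     simp only [pvOutside, Bool.not_eq_true', Bool.and_eq_false_iff,
       decide_eq_false_iff_not, not_le, not_lt];
     simp only [List.headD_eq_head?_getD] at *; norm_num at *; omega)

theorem pvBnd_step {data : List String} {di dj : Int}
    (hd : (di, dj) ∈ altDirs) {i j : Int}
    (hin : pvOutside (i + di) (j + dj) data = false) :
    pvBnd data di dj (i + di) (j + dj) + 1 = pvBnd data di dj i j := by
  fin_cases hd <;>
    (simp only [pvOutside, Bool.not_eq_false', Bool.and_eq_true, decide_eq_true_eq] at hin;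
     simp only [pvBnd, List.headD_eq_head?_getD] at *; norm_num at *; omega)

theorem nnF_bnd_zero {data : List String} {di dj : Int}
    (hd : (di, dj) ∈ altDirs) {i j : Int} (h : pvBnd data di dj i j = 0) :
    ∀ f, nnF data di dj f i j = none := by
  intro f
  cases f with
  | zero => rfl
  | succ g => simp [nnF, pvBnd_zero_outside hd h]

theorem nnF_stable {data : List String} {di dj : Int} (hd : (di, dj) ∈ altDirs) :
    ∀ (n : Nat) (i j : Int) (f : Nat),
      pvBnd data di dj i j ≤ n → pvBnd data di dj i j ≤ f →
      nnF data di dj n i j = nnF data di dj f i j := by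
  intro n
  induction n with
  | zero =>
    intro i j f h0 _
    exact ((nnF_bnd_zero hd (Nat.le_zero.mp h0) f).symm).symm ▸
      (nnF_bnd_zero hd (Nat.le_zero.mp h0) f).symm
  | succ m ih =>
    intro i j f h hf
    cases f with
    | zero =>
      have hz : pvBnd data di dj i j = 0 := Nat.le_zero.mp hf
      rw [nnF_bnd_zero hd hz, nnF_bnd_zero hd hz]
    | succ g =>
      simp only [nnF]
      by_cases ho : pvOutside (i + di) (j + dj) data = true
      · simp [ho]
      · have ho' : pvOutside (i + di) (j + dj) data = false := by
          simpa using ho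
        simp only [ho', Bool.false_eq_true, if_false]
        by_cases hs : pvCell data (i + di) (j + dj) ≠ '.'
        · simp [hs]
        · simp only [hs, if_false]
          have hstep := pvBnd_step hd (i := i) (j := j) ho'
          exact ih (i + di) (j + dj) g (by omega) (by omega)

theorem Seek_eq {data : List String} {di dj : Int} (hd : (di, dj) ∈ altDirs) (i j : Int) :
    Seek data di dj i j =
      if pvOutside (i + di) (j + dj) data then none
      else if pvCell data (i + di) (j + dj) ≠ '.' then some (pvCell data (i + di) (j + dj))
      else Seek data di dj (i + di) (j + dj) := by
  unfold Seek
  cases hB : pvBnd data di dj i j with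
  | zero =>
    rw [if_pos (pvBnd_zero_outside hd hB)]
    rfl
  | succ m =>
    simp only [nnF]
    by_cases ho : pvOutside (i + di) (j + dj) data = true
    · simp [ho]
    · have ho' : pvOutside (i + di) (j + dj) data = false := by simpa using ho
      simp only [ho', Bool.false_eq_true, if_false]
      by_cases hs : pvCell data (i + di) (j + dj) ≠ '.'
      · simp [hs]
      · simp only [hs, if_false]
        have hstep := pvBnd_step hd (i := i) (j := j) ho'
        exact nnF_stable hd m (i + di) (j + dj) _ (by omega) (by omega)

theorem adjD_mem {w : Nat} (hw : w ∈ pvWays) : adjD w ∈ altDirs := by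
  fin_cases hw <;> decide

theorem nn_eq_Seek {data : List String} {w : Nat} (hw : w ∈ pvWays) {i j : Int}
    (hi0 : 0 ≤ i) (hi1 : i < (data.length : Int))
    (hj0 : 0 ≤ j) (hj1 : j < ((data.headD "").length : Int)) :
    nn i j w data = Seek data (adjD w).1 (adjD w).2 i j := by
  unfold nn Seek
  apply nnF_stable (adjD_mem hw)
  · fin_cases hw <;>
      (simp only [adjD, pvBnd, pvFuel, List.headD_eq_head?_getD] at *; norm_num at *; omega)
  · exact Nat.le_refl _

-- --- generic fold helpers ---

theorem foldl_pres {α σ : Type} (P : σ → Prop) (f : σ → α → σ) (l : List α)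
    (h : ∀ s a, a ∈ l → P s → P (f s a)) : ∀ s, P s → P (l.foldl f s) := by
  induction l with
  | nil => intro s hs; exact hs
  | cons x xs ih =>
    intro s hs
    exact ih (fun s a ha => h s a (List.mem_cons_of_mem _ ha)) _
      (h s x (List.mem_cons_self) hs)

theorem foldl_est {α σ : Type} (P : σ → Prop) (f : σ → α → σ) (l : List α) (x : α)
    (hx : x ∈ l) (hest : ∀ s, P (f s x))
    (hpres : ∀ s a, a ∈ l → P s → P (f s a)) : ∀ s, P (l.foldl f s) := by
  induction l with
  | nil => cases hx
  | cons y ys ih =>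
    intro s
    rcases List.mem_cons.mp hx with rfl | hx'
    · exact foldl_pres P f ys (fun s a ha => hpres s a (List.mem_cons_of_mem _ ha)) _ (hest s)
    · exact ih hx' (fun s a ha => hpres s a (List.mem_cons_of_mem _ ha)) _

-- --- the sweep builds exactly the Seek table ---

def GoodVis (data : List String) (vis : PySem.Dict (Int × Int × Int × Int) (Option Char)) : Prop :=
  ∀ (di dj i j : Int) (o : Option Char),
    vis.get? (di, dj, i, j) = some o → o = Seek data di dj i j

theorem walk_good {data : List String} {di dj : Int} (hd : (di, dj) ∈ altDirs) :
    ∀ (fuel : Nat) (i j : Int) (cur : Option Char) vis,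
      GoodVis data vis →
      (pvInb (data.length : Int) ((data.headD "").length : Int) i j = true →
        cur = Seek data di dj i j) →
      GoodVis data
        (walkF data (data.length : Int) ((data.headD "").length : Int) di dj fuel i j cur vis) := by
  intro fuel
  induction fuel with
  | zero => intro i j cur vis hG _; exact hG
  | succ f ih =>
    intro i j cur vis hG hcur
    simp only [walkF]
    by_cases hin : pvInb (data.length : Int) ((data.headD "").length : Int) i j = true
    · rw [if_pos hin]
      apply ih
      · intro a b x y o hget
        rw [PySem.Dict.get?_insert] at hget
        split at hget
        · rename_i heq
          obtain ⟨rfl, rfl, rfl, rfl⟩ : a = di ∧ b = dj ∧ x = i ∧ y = j := by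
            simpa [Prod.ext_iff] using heq
          cases hget
          exact hcur hin
        · exact hG a b x y o hget
      · intro _
        have ho : pvOutside i j data = false := by
          rw [pvOutside_eq, hin]; rfl
        rw [Seek_eq hd (i - di) (j - dj), (show i - di + di = i by ring),
          (show j - dj + dj = j by ring),
          if_neg (show ¬(pvOutside i j data = true) by simp [ho])]
        by_cases hc : pvCell data i j = '.'
        · simp only [if_neg (show ¬(pvCell data i j ≠ '.') by simp [hc])]
          exact hcur hin
        · simp only [if_pos (show pvCell data i j ≠ '.' from hc)]
    · rw [if_neg hin]; exact hG

theorem walk_mem {data : List String} {R C di dj : Int} :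
    ∀ (fuel : Nat) (i j : Int) (cur : Option Char) vis (k : Int × Int × Int × Int),
      ((vis : PySem.Dict (Int × Int × Int × Int) (Option Char)).get? k).isSome →
      ((walkF data R C di dj fuel i j cur vis).get? k).isSome := by
  intro fuel
  induction fuel with
  | zero => intro i j cur vis k h; exact h
  | succ f ih =>
    intro i j cur vis k h
    simp only [walkF]
    by_cases hin : pvInb R C i j = true
    · rw [if_pos hin]
      apply ih
      rw [PySem.Dict.get?_insert]
      split
      · simp
      · exact h
    · rw [if_neg hin]; exact h

theorem walk_visits {data : List String} {di dj : Int} :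
    ∀ (t fuel : Nat) (i j : Int) (cur : Option Char) vis,
      t < fuel →
      (∀ u : Nat, u ≤ t →
        pvInb (data.length : Int) ((data.headD "").length : Int)
          (i - (u : Int) * di) (j - (u : Int) * dj) = true) →
      ((walkF data (data.length : Int) ((data.headD "").length : Int) di dj fuel i j cur vis).get?
        (di, dj, i - (t : Int) * di, j - (t : Int) * dj)).isSome := by
  intro t
  induction t with
  | zero =>
    intro fuel i j cur vis hf hin
    obtain ⟨f, rfl⟩ : ∃ f, fuel = f + 1 := ⟨fuel - 1, by omega⟩
    have h0 := hin 0 (Nat.le_refl 0)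
    simp only [Nat.cast_zero, zero_mul, sub_zero] at h0 ⊢
    simp only [walkF]
    rw [if_pos h0]
    apply walk_mem
    simp [PySem.Dict.get?_insert_self]
  | succ t ih =>
    intro fuel i j cur vis hf hin
    obtain ⟨f, rfl⟩ : ∃ f, fuel = f + 1 := ⟨fuel - 1, by omega⟩
    have h0 := hin 0 (Nat.zero_le _)
    simp only [Nat.cast_zero, zero_mul, sub_zero] at h0
    simp only [walkF]
    rw [if_pos h0]
    have hkey : (i - ((t : Int) + 1) * di) = (i - di) - (t : Int) * di := by ring
    have hkey' : (j - ((t : Int) + 1) * dj) = (j - dj) - (t : Int) * dj := by ring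
    have := ih f (i - di) (j - dj)
      (if pvCell data i j ≠ '.' then some (pvCell data i j) else cur)
      (vis.insert (di, dj, i, j) cur) (by omega)
      (fun u hu => by
        have := hin (u + 1) (by omega)
        push_cast at this ⊢
        rw [(show i - di - (u : Int) * di = i - ((u : Int) + 1) * di by ring),
          (show j - dj - (u : Int) * dj = j - ((u : Int) + 1) * dj by ring)]
        exact this)
    push_cast
    rw [hkey, hkey']
    exact this

def tstar (data : List String) (di dj i j : Int) : Nat :=
  min (if di = -1 then i.toNat
       else if di = 1 then ((data.length : Int) - 1 - i).toNat
       else data.length + (data.headD "").length)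
      (if dj = -1 then j.toNat
       else if dj = 1 then (((data.headD "").length : Int) - 1 - j).toNat
       else data.length + (data.headD "").length)

theorem tstar_inb {data : List String} {di dj : Int} (hd : (di, dj) ∈ altDirs) {i j : Int}
    (hi0 : 0 ≤ i) (hi1 : i < (data.length : Int))
    (hj0 : 0 ≤ j) (hj1 : j < ((data.headD "").length : Int)) :
    ∀ v : Nat, v ≤ tstar data di dj i j →
      pvInb (data.length : Int) ((data.headD "").length : Int)
        (i + (v : Int) * di) (j + (v : Int) * dj) = true := by
  intro v hv
  fin_cases hd <;>
    (simp only [tstar] at hv;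
     simp only [pvInb, Bool.and_eq_true, decide_eq_true_eq];
     simp only [List.headD_eq_head?_getD] at *; norm_num at *; omega)

theorem tstar_stop {data : List String} {di dj : Int} (hd : (di, dj) ∈ altDirs) {i j : Int}
    (hi0 : 0 ≤ i) (hi1 : i < (data.length : Int))
    (hj0 : 0 ≤ j) (hj1 : j < ((data.headD "").length : Int)) :
    pvInb (data.length : Int) ((data.headD "").length : Int)
      (i + ((tstar data di dj i j : Int) + 1) * di) (j + ((tstar data di dj i j : Int) + 1) * dj) = false := by
  fin_cases hd <;>
    (simp only [tstar, pvInb, Bool.and_eq_false_iff, decide_eq_false_iff_not, not_le, not_lt];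
     simp only [List.headD_eq_head?_getD] at *; norm_num at *; omega)

theorem tstar_lt_fuel {data : List String} {di dj : Int} (hd : (di, dj) ∈ altDirs) {i j : Int}
    (hi0 : 0 ≤ i) (hi1 : i < (data.length : Int))
    (hj0 : 0 ≤ j) (hj1 : j < ((data.headD "").length : Int)) :
    tstar data di dj i j < pvFuel data := by
  fin_cases hd <;>
    (simp only [tstar, pvFuel, List.headD_eq_head?_getD] at *; norm_num at *; try omega)

theorem visFold_good (data : List String) : GoodVis data (visFold data) := by
  unfold visFold
  refine foldl_pres _ _ _ ?_ _ ?_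
  · intro vis d hdm hG
    refine foldl_pres _ _ _ ?_ _ hG
    intro vis' si _ hG'
    refine foldl_pres _ _ _ ?_ _ hG'
    intro vis'' sj _ hG''
    dsimp only
    split
    · exact hG''
    · rename_i hskip
      have hd' : (d.1, d.2) ∈ altDirs := by simpa using hdm
      refine walk_good hd' _ _ _ _ _ hG'' ?_
      intro _
      rw [Seek_eq hd' (si : Int) (sj : Int),
        if_pos (show pvOutside ((si : Int) + d.1) ((sj : Int) + d.2) data = true by
          rw [pvOutside_eq]
          simpa using hskip)]
  · intro di dj i j o h
    rw [PySem.Dict.get?_empty] at h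
    cases h

theorem visFold_mem (data : List String) {d : Int × Int} (hd : d ∈ altDirs) {i j : Int}
    (hi0 : 0 ≤ i) (hi1 : i < (data.length : Int))
    (hj0 : 0 ≤ j) (hj1 : j < ((data.headD "").length : Int)) :
    ((visFold data).get? (d.1, d.2, i, j)).isSome := by
  have hd' : (d.1, d.2) ∈ altDirs := by simpa using hd
  have hts := tstar_inb hd' hi0 hi1 hj0 hj1 (tstar data d.1 d.2 i j) (Nat.le_refl _)
  simp only [pvInb, Bool.and_eq_true, decide_eq_true_eq] at hts
  obtain ⟨⟨⟨hA0, hA1⟩, hB0⟩, hB1⟩ := hts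
  unfold visFold
  refine foldl_est
    (fun vis : PySem.Dict (Int × Int × Int × Int) (Option Char) =>
      (vis.get? (d.1, d.2, i, j)).isSome = true) _ _ d hd ?_ ?_ _
  · -- processing direction d writes the key: its sight-line is walked from its far end
    intro vis
    refine foldl_est
      (fun vis : PySem.Dict (Int × Int × Int × Int) (Option Char) =>
        (vis.get? (d.1, d.2, i, j)).isSome = true) _
      (PySem.List.pyRange 0 (data.length : Int) 1)
      (i + (tstar data d.1 d.2 i j : Int) * d.1)
      (by rw [PySem.List.mem_pyRange_one]; omega) ?_ ?_ _
    · intro vis'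
      refine foldl_est
        (fun vis : PySem.Dict (Int × Int × Int × Int) (Option Char) =>
          (vis.get? (d.1, d.2, i, j)).isSome = true) _
        (PySem.List.pyRange 0 ((data.headD "").length : Int) 1)
        (j + (tstar data d.1 d.2 i j : Int) * d.2)
        (by rw [PySem.List.mem_pyRange_one]; omega) ?_ ?_ _
      · intro vis''
        dsimp only
        have hstop := tstar_stop hd' hi0 hi1 hj0 hj1
        rw [if_neg (by
          rw [show i + (tstar data d.1 d.2 i j : Int) * d.1 + d.1
              = i + ((tstar data d.1 d.2 i j : Int) + 1) * d.1 by ring,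
            show j + (tstar data d.1 d.2 i j : Int) * d.2 + d.2
              = j + ((tstar data d.1 d.2 i j : Int) + 1) * d.2 by ring]
          simp only [List.headD_eq_head?_getD] at hstop
          simp [hstop])]
        have hkey : (d.1, d.2, i, j)
            = (d.1, d.2,
                (i + (tstar data d.1 d.2 i j : Int) * d.1) - (tstar data d.1 d.2 i j : Int) * d.1,
                (j + (tstar data d.1 d.2 i j : Int) * d.2) - (tstar data d.1 d.2 i j : Int) * d.2) := by
          congr 2 <;> ring_nf
        rw [hkey]
        refine walk_visits _ _ _ _ _ _ (tstar_lt_fuel hd' hi0 hi1 hj0 hj1) ?_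
        intro u hu
        rw [show i + (tstar data d.1 d.2 i j : Int) * d.1 - (u : Int) * d.1
            = i + ((tstar data d.1 d.2 i j - u : Nat) : Int) * d.1 by
            push_cast [Nat.cast_sub hu]; ring,
          show j + (tstar data d.1 d.2 i j : Int) * d.2 - (u : Int) * d.2
            = j + ((tstar data d.1 d.2 i j - u : Nat) : Int) * d.2 by
            push_cast [Nat.cast_sub hu]; ring]
        exact tstar_inb hd' hi0 hi1 hj0 hj1 _ (by omega)
      · intro vis'' sj _ h
        dsimp only
        split
        · exact h
        · exact walk_mem _ _ _ _ _ _ h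
    · intro vis' si _ h
      refine foldl_pres
        (fun vis : PySem.Dict (Int × Int × Int × Int) (Option Char) =>
          (vis.get? (d.1, d.2, i, j)).isSome = true) _ _ ?_ _ h
      intro vis'' sj _ h'
      dsimp only
      split
      · exact h'
      · exact walk_mem _ _ _ _ _ _ h'
  · intro vis e _ h
    refine foldl_pres
      (fun vis : PySem.Dict (Int × Int × Int × Int) (Option Char) =>
        (vis.get? (d.1, d.2, i, j)).isSome = true) _ _ ?_ _ h
    intro vis' si _ h'
    refine foldl_pres
      (fun vis : PySem.Dict (Int × Int × Int × Int) (Option Char) =>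
        (vis.get? (d.1, d.2, i, j)).isSome = true) _ _ ?_ _ h'
    intro vis'' sj _ h''
    dsimp only
    split
    · exact h''
    · exact walk_mem _ _ _ _ _ _ h''

theorem visFold_getD (data : List String) {d : Int × Int} (hd : d ∈ altDirs) {i j : Int}
    (hi0 : 0 ≤ i) (hi1 : i < (data.length : Int))
    (hj0 : 0 ≤ j) (hj1 : j < ((data.headD "").length : Int)) :
    (visFold data).getD (d.1, d.2, i, j) none = Seek data d.1 d.2 i j := by
  obtain ⟨o, ho⟩ := Option.isSome_iff_exists.mp (visFold_mem data hd hi0 hi1 hj0 hj1)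
  rw [PySem.Dict.getD_eq_get?_getD, ho]
  exact visFold_good data d.1 d.2 i j o ho

-- --- per-cell characterisation of A ---

theorem emptyLoop_eq (i j : Int) (data : List String) (ws : List Nat) :
    emptyLoop i j data ws
      = if ws.any (fun w => nn i j w data == some '#') then "L" else "#" := by
  induction ws with
  | nil => rfl
  | cons w ws ih =>
    simp only [emptyLoop, List.any_cons, ih]
    by_cases h : nn i j w data = some '#' <;> simp [h]

theorem occupLoop_eq (i j : Int) (data : List String) :
    ∀ (ws : List Nat) (c : Int), c < 5 →
      occupLoop i j data ws c
        = if 5 ≤ c + (ws.countP (fun w => nn i j w data == some '#') : Int) then "L" else "#" := by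
  intro ws
  induction ws with
  | nil => intro c hc; simp [occupLoop]; omega
  | cons w ws ih =>
    intro c hc
    simp only [occupLoop, List.countP_cons]
    by_cases h : nn i j w data = some '#'
    · simp only [h, beq_self_eq_true, if_true]
      by_cases h5 : 5 ≤ c + 1
      · rw [if_pos h5, if_pos (by push_cast; omega)]
      · rw [if_neg h5, ih (c + 1) (by omega)]
        push_cast
        split_ifs <;> first | rfl | omega
    · have hb : (nn i j w data == some '#') = false := by
        simpa using h
      simp only [h, if_false, hb, Bool.false_eq_true, add_zero]
      rw [if_neg (by omega), ih c hc]

theorem count_ways {data : List String} {i j : Int}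
    (hi0 : 0 ≤ i) (hi1 : i < (data.length : Int))
    (hj0 : 0 ≤ j) (hj1 : j < ((data.headD "").length : Int)) :
    pvWays.countP (fun w => nn i j w data == some '#') = cntN data i j := by
  have e0 := nn_eq_Seek (data := data) (w := 0) (by decide) hi0 hi1 hj0 hj1
  have e1 := nn_eq_Seek (data := data) (w := 1) (by decide) hi0 hi1 hj0 hj1
  have e2 := nn_eq_Seek (data := data) (w := 2) (by decide) hi0 hi1 hj0 hj1
  have e3 := nn_eq_Seek (data := data) (w := 3) (by decide) hi0 hi1 hj0 hj1
  have e5 := nn_eq_Seek (data := data) (w := 5) (by decide) hi0 hi1 hj0 hj1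
  have e6 := nn_eq_Seek (data := data) (w := 6) (by decide) hi0 hi1 hj0 hj1
  have e7 := nn_eq_Seek (data := data) (w := 7) (by decide) hi0 hi1 hj0 hj1
  have e8 := nn_eq_Seek (data := data) (w := 8) (by decide) hi0 hi1 hj0 hj1
  simp only [adjD] at e0 e1 e2 e3 e5 e6 e7 e8
  simp only [pvWays, cntN, altDirs, List.countP_cons, List.countP_nil]
  rw [e0, e1, e2, e3, e5, e6, e7, e8]

theorem Acell (data : List String) (i j : Int)
    (hi0 : 0 ≤ i) (hi1 : i < (data.length : Int))
    (hj0 : 0 ≤ j) (hj1 : j < ((data.headD "").length : Int))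
    (acc : List (Int × Int × String)) :
    (let c := pvCell data i j
     let old := String.ofList [c]
     let new_val :=
       if c = 'L' then empty_prim i j data
       else if c = '#' then occup_prim i j data
       else old
     if new_val ≠ old then acc ++ [(i, j, new_val)] else acc)
      = (match changeAt data i j with
         | some v => acc ++ [(i, j, v)]
         | none => acc) := by
  have hcw := count_ways (data := data) hi0 hi1 hj0 hj1
  have hE : empty_prim i j data = if cntN data i j = 0 then "#" else "L" := by
    unfold empty_prim
    rw [emptyLoop_eq]
    by_cases h0 : cntN data i j = 0
    · rw [if_pos h0]
      rw [show pvWays.any (fun w => nn i j w data == some '#') = false by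
        rw [List.any_eq_false]
        intro x hx
        have h := List.countP_eq_zero.mp (by rw [hcw]; exact h0) x hx
        simpa using h]
      rfl
    · rw [if_neg h0]
      rw [show pvWays.any (fun w => nn i j w data == some '#') = true by
        rw [List.any_eq_true]
        exact List.countP_pos_iff.mp (Nat.pos_of_ne_zero (by rw [hcw]; exact h0))]
      rfl
  have hO : occup_prim i j data = if 5 ≤ cntN data i j then "L" else "#" := by
    unfold occup_prim
    rw [occupLoop_eq i j data pvWays 0 (by omega), hcw, zero_add]
    split_ifs with a b <;> first | rfl | omega
  dsimp only
  rw [hE, hO]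
  unfold changeAt
  dsimp only
  by_cases hL : pvCell data i j = 'L'
  · rw [hL]
    split_ifs <;> simp_all
  · by_cases hH : pvCell data i j = '#'
    · rw [hH]
      split_ifs <;> simp_all
    · split_ifs <;> simp_all

theorem A_eq_canonical (data : List String) : get_changes data = canonical data := by
  unfold get_changes canonical
  refine PySem.List.foldl_congr_mem _ _ _ _ ?_
  intro acc i hi
  refine PySem.List.foldl_congr_mem _ _ _ _ ?_
  intro acc' j hj
  rw [PySem.List.mem_pyRange_one] at hi hj
  exact Acell data i j hi.1 hi.2 hj.1 hj.2 acc'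

theorem Bcell (data : List String) (i j : Int)
    (hi0 : 0 ≤ i) (hi1 : i < (data.length : Int))
    (hj0 : 0 ≤ j) (hj1 : j < ((data.headD "").length : Int))
    (acc : List (Int × Int × String)) :
    (let c := pvCell data i j
     let k : Int := altDirs.foldl
       (fun s d => s + (if (visFold data).getD (d.1, d.2, i, j) none = some '#' then 1 else 0)) 0
     if c = 'L' ∧ k = 0 then acc ++ [(i, j, "#")]
     else if c = '#' ∧ 5 ≤ k then acc ++ [(i, j, "L")]
     else acc)
      = (match changeAt data i j with
         | some v => acc ++ [(i, j, v)]
         | none => acc) := by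
  have hk : (altDirs.foldl
      (fun s d => s + (if (visFold data).getD (d.1, d.2, i, j) none = some '#' then 1 else 0)) 0 : Int)
      = (cntN data i j : Int) := by
    rw [PySem.List.foldl_congr_mem altDirs _
      (fun s d => s + (if Seek data d.1 d.2 i j = some '#' then (1 : Int) else 0)) 0
      (by
        intro s d hd
        rw [visFold_getD data hd hi0 hi1 hj0 hj1])]
    rw [PySem.List.foldl_add altDirs (fun d => if Seek data d.1 d.2 i j = some '#' then (1 : Int) else 0) 0]
    rw [show (fun d : Int × Int => if Seek data d.1 d.2 i j = some '#' then (1 : Int) else 0)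
        = fun d : Int × Int => if (Seek data d.1 d.2 i j == some '#') = true then (1 : Int) else 0 by
      funext d
      simp]
    rw [PySem.List.sum_map_ite_one_zero]
    simp [cntN]
  dsimp only
  rw [hk]
  unfold changeAt
  dsimp only
  split_ifs <;> first | rfl | (exfalso; simp only [Nat.cast_eq_zero, Nat.ofNat_le_cast] at *; tauto)

theorem B_eq_canonical (data : List String) : get_changes_alt data = canonical data := by
  unfold get_changes_alt
  by_cases hne : data.isEmpty
  · rw [if_pos hne]
    have : data = [] := by simpa using hne
    subst this
    unfold canonical
    simp [PySem.List.pyRange_one_eq_nil]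
  · rw [if_neg hne]
    dsimp only
    unfold canonical
    refine PySem.List.foldl_congr_mem _ _ _ _ ?_
    intro acc i hi
    refine PySem.List.foldl_congr_mem _ _ _ _ ?_
    intro acc' j hj
    rw [PySem.List.mem_pyRange_one] at hi hj
    exact Bcell data i j hi.1 hi.2 hj.1 hj.2 acc' 

-- ===== VERDICT (by name: the statement is the Claim_ definition above) =====
theorem get_changes_spec : Claim_equal_get_changes := by
  intro data _ _
  unfold Spec_get_changes
  rw [A_eq_canonical, B_eq_canonical]
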